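-- pv_equiv track=rewrite | github.com/KIM-HANJOO/main_hydrogen | module/submodule/branch.py | makebranch
-- ===== SOURCE A (Python) =====
-- def makebranch(top, bar, empty, middle, end, show, string_list, br_length, istip, structure) :
--     allstr = []
--
--     for i in range(len(br_length)) :
--
--         string_temp = []
--
--         # one space for [m]
--         if i == 0 :
--             allstr.append(top)
--         elif i != 0 :
--             if br_length[i] == 0 :
--                 allstr.append(bar)
--
--         # detemine tip or middle
--         if istip[i] == 0 :
--             end_temp = middle
--         elif istip[i] == 1:
--             end_temp = end
--
--         # make branch by structure
--         for j, x in enumerate(structure[i]) :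
--             if j <= br_length[i] :
--                 if x == str(0) :
--                     string_temp.append(' ' + empty)
--
--                 elif x == str(1) :
--                     if j != len(structure[i]) :
--                         if structure[i][j + 1 : ].find(str(1)) == -1 :
--                             string_temp.append(end_temp)
--
--                         else :
--                             string_temp.append(bar + empty)
--
--                     elif j == len(structure[i]) :
--                         string_temp.append(end_temp)
--
--         # add original string
--         if show == 1 :
--             string_temp.append(string_list[i])
--
--         # if i != len(br_length) - 1 :
--         #     string_temp.append('\n')
--
--         string_temp_str = ''.join(string_temp)
--         allstr.append(string_temp_str)
--
--     length_allstr = []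
--     for i in range(len(allstr)) :
--         length_allstr.append(len(allstr[i]))
--
--     wannabe = (max(length_allstr) // 10 + 1) * 10
--     for i in range(len(allstr)) :
--         allstr[i] = allstr[i] + ' ' * (wannabe - len(allstr[i])) + '\n'
--
--     return ''.join(allstr)
-- ===== SOURCE B (Python) =====
-- # Same rendering by splitting: each truncated row is split on '1' into runs, every run
-- # collapses to pad0 repeated by its '0'-count, and the runs are re-joined with pad1
-- # except that the final joint becomes the tip glyph when no '1' follows the truncation.
-- def makebranch(top, bar, empty, middle, end, show, string_list, br_length, istip, structure):
--     pad0 = ' ' + empty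
--     pad1 = bar + empty
--     rows = []
--     tip = None  # istip flags 0/1 pick the style; any other flag keeps the current one
--     for i, bl in enumerate(br_length):
--         if i == 0:
--             rows.append(top)
--         elif bl == 0:
--             rows.append(bar)
--         if istip[i] == 0:
--             tip = middle
--         elif istip[i] == 1:
--             tip = end
--         s = structure[i]
--         s2 = s[:bl + 1] if bl >= 0 else ''
--         pieces = [pad0 * p.count('0') for p in s2.split('1')]
--         if len(pieces) == 1:
--             body = pieces[0]
--         else:
--             conn = pad1 if '1' in s[len(s2):] else tip
--             body = pad1.join(pieces[:-1]) + conn + pieces[-1]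
--         if show == 1:
--             body += string_list[i]
--         rows.append(body)
--     width = (max(map(len, rows)) // 10 + 1) * 10
--     return ''.join(r.ljust(width) + '\n' for r in rows)
-- ===== Notes on version B (the rewrite author's own statement) =====
-- stated objective: alternative
-- what changed: Instead of scanning characters and re-testing the suffix at every '1', B splits each truncated row on '1' into runs, collapses every run to pad0 repeated by its '0'-count, and re-joins the runs with pad1, replacing only the last joint by the tip glyph when no '1' follows the truncation; padding is one join over ljust'ed rows.
import Mathlib
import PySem

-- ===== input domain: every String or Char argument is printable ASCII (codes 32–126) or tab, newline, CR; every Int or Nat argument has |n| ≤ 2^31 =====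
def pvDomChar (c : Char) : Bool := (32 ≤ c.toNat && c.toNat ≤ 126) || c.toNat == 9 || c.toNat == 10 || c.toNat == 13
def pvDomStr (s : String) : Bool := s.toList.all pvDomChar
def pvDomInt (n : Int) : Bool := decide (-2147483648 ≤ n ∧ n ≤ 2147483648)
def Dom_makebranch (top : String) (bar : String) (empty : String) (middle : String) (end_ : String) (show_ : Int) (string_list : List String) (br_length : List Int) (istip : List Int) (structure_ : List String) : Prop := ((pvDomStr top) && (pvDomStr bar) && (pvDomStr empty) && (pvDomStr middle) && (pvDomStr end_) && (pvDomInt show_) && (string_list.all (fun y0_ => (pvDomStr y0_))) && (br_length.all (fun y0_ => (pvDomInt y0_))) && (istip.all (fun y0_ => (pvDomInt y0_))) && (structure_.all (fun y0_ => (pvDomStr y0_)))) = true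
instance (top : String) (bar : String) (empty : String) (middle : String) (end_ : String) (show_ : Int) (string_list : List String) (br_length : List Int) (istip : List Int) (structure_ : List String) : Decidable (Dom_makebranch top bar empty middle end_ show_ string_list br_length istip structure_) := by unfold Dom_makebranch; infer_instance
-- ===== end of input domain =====

-- B renders each row by splitting it on '1' into runs and re-joining them, instead of
-- A's per-character scan that re-searches the suffix at every '1'
-- (objective: alternative).

-- ===== PORT A =====
-- inner 'for j, x in enumerate(structure[i])' loop of A (et = the current end_temp)
def pvRowA (bar empty et : List Char) (bl : Int) (s : List Char) : List Char :=
  (PySem.List.enumerate s).foldl (fun acc jx =>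
    if jx.1 ≤ bl then
      if jx.2 = '0' then acc ++ (' ' :: empty)
      else if jx.2 = '1' then
        if jx.1 ≠ (s.length : Int) then
          (if PySem.Chars.find (PySem.List.slice s (some (jx.1 + 1)) none) ['1'] = -1
           then acc ++ et
           else acc ++ (bar ++ empty))
        else acc ++ et
      else acc
    else acc) []

-- one iteration of A's main 'for i in range(len(br_length))' loop; the state carries
-- end_temp as an Option (it starts unassigned in Python: NameError if read before set,
-- unreached under Pre_)
def pvStepA (top bar empty middle end_ : String) (show_ : Int) (string_list : List String) (br_length istip : List Int) (structure_ : List String) (st : List (List Char) × Option (List Char)) (i : Nat) : List (List Char) × Option (List Char) :=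
  let allstr := if i = 0 then st.1 ++ [top.toList]
    else if PySem.List.pyGetD br_length (i : Int) 0 = 0 then st.1 ++ [bar.toList]
    else st.1
  let et : Option (List Char) :=
    if PySem.List.pyGetD istip (i : Int) 0 = 0 then some middle.toList
    else if PySem.List.pyGetD istip (i : Int) 0 = 1 then some end_.toList
    else st.2
  let row := pvRowA bar.toList empty.toList (et.getD []) (PySem.List.pyGetD br_length (i : Int) 0)
    (PySem.List.pyGetD structure_ (i : Int) "").toList
  let row := if show_ = 1 then row ++ (PySem.List.pyGetD string_list (i : Int) "").toList else row
  (allstr ++ [row], et)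

def makebranch (top : String) (bar : String) (empty : String) (middle : String) (end_ : String) (show_ : Int) (string_list : List String) (br_length : List Int) (istip : List Int) (structure_ : List String) : String :=
  let st := (List.range br_length.length).foldl
    (pvStepA top bar empty middle end_ show_ string_list br_length istip structure_)
    (([], none) : List (List Char) × Option (List Char))
  let allstr := st.1
  let lengths := allstr.foldl (fun acc r => acc ++ [(r.length : Int)]) []
  let wannabe := (PySem.Int.floordiv ((PySem.List.max? lengths id).getD 0) 10 + 1) * 10
  let padded := (List.range allstr.length).foldl (fun acc (i : Nat) =>
    acc ++ [PySem.List.pyGetD allstr (i : Int) [] ++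
      List.replicate (wannabe - ((PySem.List.pyGetD allstr (i : Int) []).length : Int)).toNat ' ' ++ ['\n']]) []
  String.ofList (PySem.Chars.join [] padded)

-- ===== PORT B =====
-- one row of B: truncate once, split on '1', collapse each run to pad0 * (its '0'-count),
-- re-join with pad1; the last joint becomes tip when no '1' lies beyond the truncation
def pvRowB (pad0 pad1 tip : List Char) (bl : Int) (s : List Char) : List Char :=
  let s2 := if 0 ≤ bl then PySem.List.slice s none (some (bl + 1)) else []
  let pieces := (PySem.Chars.splitOn s2 ['1']).map
    (fun p => PySem.List.pyRepeat pad0 ((PySem.Chars.count p ['0'] : Int)))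
  if pieces.length = 1 then PySem.List.pyGetD pieces 0 []
  else
    let conn := if PySem.Chars.isIn ['1'] (PySem.List.slice s (some (s2.length : Int)) none)
      then pad1 else tip
    PySem.Chars.join pad1 (PySem.List.slice pieces none (some (-1))) ++ conn ++
      PySem.List.pyGetD pieces (-1) []

-- one iteration of B's 'for i, bl in enumerate(br_length)' loop; like the Python, the
-- current tip style is carried in the state (tip starts as None → Option, none unread
-- whenever the Python returns)
def pvStepB (top bar : String) (pad0 pad1 : List Char) (middle end_ : String) (show_ : Int) (string_list : List String) (istip : List Int) (structure_ : List String) (st : List (List Char) × Option (List Char)) (ib : Int × Int) : List (List Char) × Option (List Char) :=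
  let rows := if ib.1 = 0 then st.1 ++ [top.toList]
    else if ib.2 = 0 then st.1 ++ [bar.toList]
    else st.1
  let tip : Option (List Char) :=
    if PySem.List.pyGetD istip ib.1 0 = 0 then some middle.toList
    else if PySem.List.pyGetD istip ib.1 0 = 1 then some end_.toList
    else st.2
  let body := pvRowB pad0 pad1 (tip.getD []) ib.2 (PySem.List.pyGetD structure_ ib.1 "").toList
  let body := if show_ = 1 then body ++ (PySem.List.pyGetD string_list ib.1 "").toList else body
  (rows ++ [body], tip)

def makebranch_alt (top : String) (bar : String) (empty : String) (middle : String) (end_ : String) (show_ : Int) (string_list : List String) (br_length : List Int) (istip : List Int) (structure_ : List String) : String :=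
  let pad0 := ' ' :: empty.toList
  let pad1 := bar.toList ++ empty.toList
  let st := (PySem.List.enumerate br_length).foldl
    (pvStepB top bar pad0 pad1 middle end_ show_ string_list istip structure_)
    (([], none) : List (List Char) × Option (List Char))
  let rows := st.1
  let width := (PySem.Int.floordiv
    ((PySem.List.max? (rows.map (fun r => (r.length : Int))) id).getD 0) 10 + 1) * 10
  String.ofList (PySem.Chars.join []
    (rows.map (fun r => r ++ List.replicate (width - (r.length : Int)).toNat ' ' ++ ['\n'])))

-- ===== PRECONDITION & SPEC =====
-- Pre_ excludes exactly the inputs on which A raises: empty br_length (max([]) ValueError),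
-- istip/structure_/string_list shorter than br_length (IndexError), and rows that need a
-- tip glyph before any istip flag 0/1 has set end_temp (NameError; B raises there too).
def Pre_makebranch (top : String) (bar : String) (empty : String) (middle : String) (end_ : String) (show_ : Int) (string_list : List String) (br_length : List Int) (istip : List Int) (structure_ : List String) : Prop :=
  br_length ≠ [] ∧
  br_length.length ≤ istip.length ∧
  br_length.length ≤ structure_.length ∧
  (show_ = 1 → br_length.length ≤ string_list.length) ∧
  (∀ i : Nat, i < br_length.length →
    (∃ m : Nat, ∃ _ : m < (structure_.getD i "").toList.length,
        (structure_.getD i "").toList.getD m ' ' = '1' ∧ (m : Int) ≤ br_length.getD i 0 ∧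
        '1' ∉ (structure_.getD i "").toList.drop (m + 1)) →
    ∃ k : Nat, k ≤ i ∧ (istip.getD k 2 = 0 ∨ istip.getD k 2 = 1))
instance (top : String) (bar : String) (empty : String) (middle : String) (end_ : String) (show_ : Int) (string_list : List String) (br_length : List Int) (istip : List Int) (structure_ : List String) : Decidable (Pre_makebranch top bar empty middle end_ show_ string_list br_length istip structure_) := by unfold Pre_makebranch; infer_instance

def pvWitness_makebranch : String × String × String × String × String × Int × List String × List Int × List Int × List String :=
  ("[m]", "|", "__", "|-", "`-", 1, ["a", "b"], [0, 1], [0, 1], ["1", "01"])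

def Spec_makebranch (top : String) (bar : String) (empty : String) (middle : String) (end_ : String) (show_ : Int) (string_list : List String) (br_length : List Int) (istip : List Int) (structure_ : List String) (out : String) : Prop := out = makebranch_alt top bar empty middle end_ show_ string_list br_length istip structure_
instance (top : String) (bar : String) (empty : String) (middle : String) (end_ : String) (show_ : Int) (string_list : List String) (br_length : List Int) (istip : List Int) (structure_ : List String) (out : String) : Decidable (Spec_makebranch top bar empty middle end_ show_ string_list br_length istip structure_ out) := by unfold Spec_makebranch; infer_instance

-- ===== CLAIM (what is proved, stated in full; the proofs are below) =====
def Claim_equal_makebranch : Prop := ∀ (top : String) (bar : String) (empty : String) (middle : String) (end_ : String) (show_ : Int) (string_list : List String) (br_length : List Int) (istip : List Int) (structure_ : List String), Dom_makebranch top bar empty middle end_ show_ string_list br_length istip structure_ → Pre_makebranch top bar empty middle end_ show_ string_list br_length istip structure_ → Spec_makebranch top bar empty middle end_ show_ string_list br_length istip structure_ (makebranch top bar empty middle end_ show_ string_list br_length istip structure_)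

-- ===== LEMMAS AND PROOFS =====

-- proof-side model of str.split('1') on a row
def pvSplit : List Char → List (List Char)
  | [] => [[]]
  | c :: r => if c = '1' then [] :: pvSplit r else (c :: (pvSplit r).headI) :: (pvSplit r).tail

lemma pvSplit_ne_nil (l : List Char) : pvSplit l ≠ [] := by
  cases l with
  | nil => simp [pvSplit]
  | cons c r => by_cases h : c = '1' <;> simp [pvSplit, h]

lemma pvSplit_length (l : List Char) : (pvSplit l).length = l.count '1' + 1 := by
  induction l with
  | nil => simp [pvSplit]
  | cons c r ih =>
    by_cases h : c = '1'
    · simp [pvSplit, h, ih, List.count_cons]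
    · have hne := pvSplit_ne_nil r
      cases hpv : pvSplit r with
      | nil => exact absurd hpv hne
      | cons a t =>
        rw [hpv] at ih
        simp [pvSplit, h, hpv, List.count_cons] at *
        omega

lemma pvSplit_go_spec (l : List Char) : ∀ (fuel : Nat), l.length ≤ fuel →
    ∀ (cur : List Char) (acc : List (List Char)),
    PySem.Chars.splitOn.go ['1'] fuel l cur acc
      = acc.reverse ++ ((cur.reverse ++ (pvSplit l).headI) :: (pvSplit l).tail) := by
  induction l with
  | nil =>
    intro fuel _ cur acc
    cases fuel <;> simp [PySem.Chars.splitOn.go, pvSplit]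
  | cons c r ih =>
    intro fuel hfuel cur acc
    cases fuel with
    | zero => simp at hfuel
    | succ f =>
      by_cases h : c = '1'
      · subst h
        have hpre : List.isPrefixOf ['1'] ('1' :: r) = true := by
          simp [List.isPrefixOf]
        rw [PySem.Chars.splitOn.go, if_pos hpre]
        simp only [List.length_cons, List.drop_succ_cons, List.length_nil, List.drop_zero]
        rw [ih f (by simpa using hfuel) [] (cur.reverse :: acc)]
        have hne := pvSplit_ne_nil r
        cases hpv : pvSplit r with
        | nil => exact absurd hpv hne
        | cons a t => simp [pvSplit, hpv]
      · have hpre : List.isPrefixOf ['1'] (c :: r) = false := by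
          simp [List.isPrefixOf]
          exact fun he => absurd he.symm h
        rw [PySem.Chars.splitOn.go, if_neg (by simp [hpre])]
        rw [ih f (by simpa using hfuel) (c :: cur) acc]
        have hne := pvSplit_ne_nil r
        cases hpv : pvSplit r with
        | nil => exact absurd hpv hne
        | cons a t => simp [pvSplit, h, hpv]

lemma pvSplitOn_eq (l : List Char) : PySem.Chars.splitOn l ['1'] = pvSplit l := by
  unfold PySem.Chars.splitOn
  rw [pvSplit_go_spec l (l.length + 1) (by omega) [] []]
  have hne := pvSplit_ne_nil l
  cases hpv : pvSplit l with
  | nil => exact absurd hpv hne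
  | cons a t => simp

lemma pvCount_go_spec (l : List Char) : ∀ (fuel : Nat), l.length ≤ fuel → ∀ (acc : Nat),
    PySem.Chars.count.go ['0'] fuel l acc = acc + l.count '0' := by
  induction l with
  | nil =>
    intro fuel _ acc
    cases fuel <;> simp [PySem.Chars.count.go]
  | cons c r ih =>
    intro fuel hfuel acc
    cases fuel with
    | zero => simp at hfuel
    | succ f =>
      by_cases h : c = '0'
      · subst h
        have hpre : List.isPrefixOf ['0'] ('0' :: r) = true := by
          simp [List.isPrefixOf]
        rw [PySem.Chars.count.go, if_pos hpre]
        simp only [List.length_cons, List.drop_succ_cons, List.length_nil, List.drop_zero]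
        rw [ih f (by simpa using hfuel) (acc + 1)]
        simp [List.count_cons]
        omega
      · have hpre : List.isPrefixOf ['0'] (c :: r) = false := by
          simp [List.isPrefixOf]
          exact fun he => absurd he.symm h
        rw [PySem.Chars.count.go, if_neg (by simp [hpre])]
        rw [ih f (by simpa using hfuel) acc]
        simp [List.count_cons, h]

lemma pvCount_zero (l : List Char) : PySem.Chars.count l ['0'] = l.count '0' := by
  unfold PySem.Chars.count
  rw [if_neg (by simp), pvCount_go_spec l l.length (by omega) 0]
  omega

-- the common reference: render a truncated row suffix-first; tail = '1' beyond truncation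
def pvRender (pad0 pad1 tip : List Char) : List Char → Bool → List Char
  | [], _ => []
  | c :: r, tail =>
    (if c = '0' then pad0
     else if c = '1' then (if '1' ∈ r ∨ tail = true then pad1 else tip)
     else []) ++ pvRender pad0 pad1 tip r tail

-- B's run collapsing
def pvPiece (pad0 : List Char) (p : List Char) : List Char :=
  (List.replicate (p.count '0') pad0).flatten

-- B's re-join of the collapsed runs
def pvGlue (pad1 conn : List Char) (pieces : List (List Char)) : List Char :=
  PySem.Chars.join pad1 pieces.dropLast ++ conn ++ pieces.getLastD []

-- pvRender with the tail flag folded into the connector glyph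
def pvJoin1 (pad0 pad1 conn : List Char) : List Char → List Char
  | [] => []
  | c :: r =>
    (if c = '0' then pad0 else if c = '1' then (if '1' ∈ r then pad1 else conn) else []) ++
      pvJoin1 pad0 pad1 conn r

lemma pvRender_eq_join1 (pad0 pad1 tip : List Char) (s2 : List Char) (tail : Bool) :
    pvRender pad0 pad1 tip s2 tail = pvJoin1 pad0 pad1 (if tail then pad1 else tip) s2 := by
  induction s2 with
  | nil => rfl
  | cons c r ih =>
    simp only [pvRender, pvJoin1, ih]
    congr 1
    by_cases h0 : c = '0'
    · simp [h0]
    · by_cases h1 : c = '1'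
      · by_cases hr : '1' ∈ r
        · simp [h0, h1, hr]
        · cases tail <;> simp [h0, h1, hr]
      · simp [h0, h1]

lemma pvPiece_cons (pad0 : List Char) (c : Char) (p : List Char) :
    pvPiece pad0 (c :: p) = (if c = '0' then pad0 else []) ++ pvPiece pad0 p := by
  by_cases h : c = '0'
  · simp [pvPiece, h, List.count_cons, List.replicate_succ]
  · simp [pvPiece, h, List.count_cons]

lemma pvGlue_cons (pad1 conn x y z : List Char) (l : List (List Char)) :
    pvGlue pad1 conn (x :: y :: z :: l) = x ++ pad1 ++ pvGlue pad1 conn (y :: z :: l) := by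
  simp only [pvGlue, List.dropLast_cons₂, PySem.Chars.join_cons_cons, List.getLastD_cons]
  cases l <;> simp [List.dropLast_cons₂, PySem.Chars.join_cons_cons, List.getLastD_cons]

lemma pvSplit_mem_one (r : List Char) (a : List Char) (b : List Char) (t : List (List Char))
    (hpv : pvSplit r = a :: b :: t) : '1' ∈ r := by
  have hlen := pvSplit_length r
  rw [hpv] at hlen
  simp only [List.length_cons] at hlen
  have : 0 < r.count '1' := by omega
  exact List.count_pos_iff.mp this

lemma pvSplit_not_mem_one (r : List Char) (a : List Char)
    (hpv : pvSplit r = [a]) : '1' ∉ r := by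
  have hlen := pvSplit_length r
  rw [hpv] at hlen
  simp only [List.length_cons, List.length_nil] at hlen
  have : r.count '1' = 0 := by omega
  simpa using List.count_eq_zero.mp this

lemma pvGlue_head_append (pad1 conn pre x y : List Char) (l : List (List Char)) :
    pvGlue pad1 conn ((pre ++ x) :: y :: l) = pre ++ pvGlue pad1 conn (x :: y :: l) := by
  cases l with
  | nil =>
    simp [pvGlue, List.dropLast_cons₂, PySem.Chars.join_singleton]
  | cons z l2 =>
    simp [pvGlue, List.dropLast_cons₂, PySem.Chars.join_cons_cons]

lemma pvJoin1_eq (pad0 pad1 conn : List Char) (s2 : List Char) :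
    (if ((pvSplit s2).map (pvPiece pad0)).length = 1 then ((pvSplit s2).map (pvPiece pad0)).headI
     else pvGlue pad1 conn ((pvSplit s2).map (pvPiece pad0)))
    = pvJoin1 pad0 pad1 conn s2 := by
  induction s2 with
  | nil => simp [pvSplit, pvPiece, pvJoin1]
  | cons c r ih =>
    cases hpv : pvSplit r with
    | nil => exact absurd hpv (pvSplit_ne_nil r)
    | cons a t =>
      rw [hpv] at ih
      by_cases h1 : c = '1'
      · subst h1
        have hsp : pvSplit ('1' :: r) = [] :: pvSplit r := by simp [pvSplit]
        simp only [hsp, hpv, List.map_cons, List.length_cons, List.length_map]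
        rw [if_neg (by simp)]
        simp only [pvJoin1, if_neg (by decide : ¬ ('1' : Char) = '0'), if_pos rfl]
        cases t with
        | nil =>
          have hnot := pvSplit_not_mem_one r a hpv
          simp only [List.length_cons, List.length_nil, List.length_map, if_pos rfl,
            List.headI] at ih
          simp [pvGlue, PySem.Chars.join_singleton, hnot, ← ih, pvPiece]
        | cons b t2 =>
          have hmem := pvSplit_mem_one r a b t2 hpv
          simp only [List.length_cons, List.length_map] at ih
          rw [if_neg (by simp)] at ih
          simp only [List.map_cons] at ih ⊢
          rw [show pvPiece pad0 [] = ([] : List Char) from rfl,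
            pvGlue_cons pad1 conn [] (pvPiece pad0 a) (pvPiece pad0 b) (t2.map (pvPiece pad0)),
            ih]
          simp [hmem]
      · have hpc := pvPiece_cons pad0 c a
        have hsp : pvSplit (c :: r) = (c :: (pvSplit r).headI) :: (pvSplit r).tail := by
          simp [pvSplit, h1]
        simp only [hsp, hpv, List.headI, List.tail_cons, List.map_cons,
          List.length_cons, List.length_map]
        simp only [pvJoin1, if_neg h1]
        cases t with
        | nil =>
          simp only [List.map_nil, List.length_nil, if_pos rfl, List.headI]
          simp only [List.length_cons, List.length_nil, List.length_map, if_pos rfl,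
            List.headI] at ih
          rw [hpc, ← ih]
          by_cases h0 : c = '0' <;> simp [h0]
        | cons b t2 =>
          simp only [List.map_cons, List.length_cons, List.length_map]
          rw [if_neg (by simp)]
          simp only [List.length_cons, List.length_map] at ih
          rw [if_neg (by simp)] at ih
          simp only [List.map_cons] at ih
          rw [hpc, pvGlue_head_append, ih]

lemma pvRowB_eq_render (pad0 pad1 tip : List Char) (bl : Int) (s : List Char) :
    pvRowB pad0 pad1 tip bl s
    = pvRender pad0 pad1 tip (if 0 ≤ bl then List.take (bl + 1).toNat s else [])
        (decide ('1' ∈ s.drop (if 0 ≤ bl then List.take (bl + 1).toNat s else []).length)) := by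
  have hs2 : (if 0 ≤ bl then PySem.List.slice s none (some (bl + 1)) else [])
      = (if 0 ≤ bl then List.take (bl + 1).toNat s else []) := by
    by_cases h : 0 ≤ bl
    · rw [if_pos h, if_pos h, PySem.List.slice_to s (by omega)]
    · rw [if_neg h, if_neg h]
  set s2 := if 0 ≤ bl then List.take (bl + 1).toNat s else [] with hdef
  show (let s2p := if 0 ≤ bl then PySem.List.slice s none (some (bl + 1)) else []
    let pieces := (PySem.Chars.splitOn s2p ['1']).map
      (fun p => PySem.List.pyRepeat pad0 ((PySem.Chars.count p ['0'] : Int)))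
    if pieces.length = 1 then PySem.List.pyGetD pieces 0 []
    else
      let conn := if PySem.Chars.isIn ['1'] (PySem.List.slice s (some (s2p.length : Int)) none)
        then pad1 else tip
      PySem.Chars.join pad1 (PySem.List.slice pieces none (some (-1))) ++ conn ++
        PySem.List.pyGetD pieces (-1) []) = _
  simp only [hs2]
  have hmap : (PySem.Chars.splitOn s2 ['1']).map
      (fun p => PySem.List.pyRepeat pad0 ((PySem.Chars.count p ['0'] : Int)))
      = (pvSplit s2).map (pvPiece pad0) := by
    rw [pvSplitOn_eq]
    apply List.map_congr_left
    intro p _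
    rw [pvCount_zero]
    simp [PySem.List.pyRepeat, pvPiece]
  have hisin : PySem.Chars.isIn ['1'] (PySem.List.slice s (some (s2.length : Int)) none)
      = decide ('1' ∈ s.drop s2.length) := by
    rw [PySem.List.slice_from_natCast]
    by_cases h : '1' ∈ s.drop s2.length
    · simp [PySem.Chars.isIn_iff_infix, List.singleton_infix_iff, h]
    · simp only [decide_eq_false h]
      rw [← Bool.not_eq_true, PySem.Chars.isIn_iff_infix, List.singleton_infix_iff]
      exact h
  simp only [hmap, hisin]
  rw [pvRender_eq_join1, ← pvJoin1_eq pad0 pad1 (if decide ('1' ∈ s.drop s2.length) then pad1 else tip) s2]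
  set pieces := (pvSplit s2).map (pvPiece pad0) with hp
  have hne : pieces ≠ [] := by
    rw [hp]
    cases hq : pvSplit s2 with
    | nil => exact absurd hq (pvSplit_ne_nil s2)
    | cons a t => simp
  obtain ⟨a, t, hat⟩ : ∃ a t, pieces = a :: t := by
    cases hx : pieces with
    | nil => exact absurd hx hne
    | cons a t => exact ⟨a, t, rfl⟩
  by_cases hlen : pieces.length = 1
  · rw [if_pos hlen, if_pos hlen, hat]
    simp [PySem.List.pyGetD, PySem.List.pyGet?, PySem.List.pyIdx?]
  · rw [if_neg hlen, if_neg hlen]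
    have hslice : PySem.List.slice pieces none (some (-1)) = pieces.dropLast := by
      rw [hat]
      simp only [PySem.List.slice, PySem.List.clampIdx]
      rw [if_pos (by omega : (-1:Int) < 0), if_neg (by simp)]
      rw [List.dropLast_eq_take, List.drop_zero]
      congr 1
      simp
    have hlast : PySem.List.pyGetD pieces (-1) [] = pieces.getLastD [] := by
      rw [hat]
      simp [PySem.List.pyGetD, PySem.List.pyGet?, PySem.List.pyIdx?,
        List.getLastD_eq_getLast?, List.getLast?_eq_getElem?]
    rw [hslice, hlast]
    rfl

lemma pvRender_eq_flatMap (pad0 pad1 tip : List Char) :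
    ∀ (s2 : List Char) (tail : Bool) (k : Int),
    (PySem.List.enumerate s2 k).flatMap
      (fun jc => if jc.2 = '0' then pad0
        else if jc.2 = '1' then (if '1' ∈ s2.drop ((jc.1 - k).toNat + 1) ∨ tail = true then pad1 else tip)
        else [])
    = pvRender pad0 pad1 tip s2 tail := by
  intro s2
  induction s2 with
  | nil => intro tail k; simp [PySem.List.enumerate, pvRender]
  | cons c r ih =>
    intro tail k
    rw [PySem.List.enumerate_cons, List.flatMap_cons]
    rw [List.flatMap_congr (l := PySem.List.enumerate r (k + 1))
      (g := fun jc => if jc.2 = '0' then pad0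
        else if jc.2 = '1' then (if '1' ∈ r.drop ((jc.1 - (k + 1)).toNat + 1) ∨ tail = true then pad1 else tip)
        else []) ?_]
    · rw [ih tail (k + 1)]
      have h0 : ((k - k).toNat + 1) = 1 := by omega
      simp only [pvRender, h0, List.drop_succ_cons, List.drop_zero]
    · intro jc hmem
      rw [PySem.List.mem_enumerate_iff] at hmem
      obtain ⟨m, hm, rfl⟩ := hmem
      simp only
      have h1 : ((k + 1 + (m : Int)) - k).toNat + 1 = m + 2 := by omega
      have h2 : ((k + 1 + (m : Int)) - (k + 1)).toNat + 1 = m + 1 := by omega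
      rw [h1, h2, List.drop_succ_cons]

lemma pv_drop_split (s : List Char) (n m : Nat) (hm : m < (s.take n).length) :
    s.drop (m + 1) = (s.take n).drop (m + 1) ++ s.drop (s.take n).length := by
  rw [List.drop_take]
  have h2 : s.drop (s.take n).length = (s.drop (m + 1)).drop ((s.take n).length - (m + 1)) := by
    rw [List.drop_drop]
    congr 1
    simp only [List.length_take] at hm ⊢
    omega
  rw [h2]
  by_cases hn : n ≤ s.length
  · have hmin : (s.take n).length = n := by rw [List.length_take]; omega
    rw [hmin]
    exact (List.take_append_drop (n - (m + 1)) (s.drop (m + 1))).symm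
  · have hmin : (s.take n).length = s.length := by rw [List.length_take]; omega
    rw [hmin]
    have hlen2 : (s.drop (m + 1)).length ≤ n - (m + 1) := by
      rw [List.length_drop]
      omega
    rw [List.take_of_length_le hlen2,
      List.drop_of_length_le (show (s.drop (m + 1)).length ≤ s.length - (m + 1) by
        rw [List.length_drop])]
    simp

lemma pv_cond (s : List Char) (n m : Nat) (hm : m < (s.take n).length) :
    (PySem.Chars.find (PySem.List.slice s (some ((m : Int) + 1)) none) ['1'] = -1)
    ↔ ¬('1' ∈ (s.take n).drop (m + 1) ∨ '1' ∈ s.drop (s.take n).length) := by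
  rw [show ((m : Int) + 1) = ((m + 1 : Nat) : Int) by push_cast; ring,
    PySem.List.slice_from_natCast, PySem.Chars.find_eq_neg_one_iff,
    List.singleton_infix_iff, pv_drop_split s n m hm, List.mem_append]

lemma pvRow_eq (bar empty t : List Char) (bl : Int) (s : List Char) :
    pvRowA bar empty t bl s = pvRowB (' ' :: empty) (bar ++ empty) t bl s := by
  rw [pvRowB_eq_render]
  simp only [pvRowA]
  rw [PySem.List.foldl_congr_mem _ _
    (fun acc (jx : Int × Char) => acc ++
      (if jx.1 ≤ bl then
        if jx.2 = '0' then ' ' :: empty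
        else if jx.2 = '1' then
          (if PySem.Chars.find (PySem.List.slice s (some (jx.1 + 1)) none) ['1'] = -1
           then t else bar ++ empty)
        else []
      else [])) _ ?hcongr]
  case hcongr =>
    intro acc jx hmem
    rw [PySem.List.mem_enumerate_iff] at hmem
    obtain ⟨k, hk, rfl⟩ := hmem
    simp only [zero_add]
    by_cases hle : (k : Int) ≤ bl
    · rw [if_pos hle, if_pos hle]
      by_cases h0 : s[k] = '0'
      · rw [if_pos h0, if_pos h0]
      · rw [if_neg h0, if_neg h0]
        by_cases h1 : s[k] = '1'
        · rw [if_pos h1, if_pos h1, if_pos (by exact_mod_cast Nat.ne_of_lt hk)]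
          split <;> rfl
        · rw [if_neg h1, if_neg h1, List.append_nil]
    · rw [if_neg hle, if_neg hle, List.append_nil]
  rw [PySem.List.foldl_append_eq_flatMap, List.nil_append]
  by_cases hbl : 0 ≤ bl
  · simp only [if_pos hbl]
    rw [← pvRender_eq_flatMap (' ' :: empty) (bar ++ empty) t (List.take (bl + 1).toNat s) _ 0]
    by_cases hklen : (bl + 1).toNat ≤ s.length
    · conv_lhs => rw [← List.take_append_drop (bl + 1).toNat s]
      rw [PySem.List.enumerate_append, List.flatMap_append]
      have hdrop : (PySem.List.enumerate (List.drop (bl + 1).toNat s)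
          (0 + ((List.take (bl + 1).toNat s).length : Int))).flatMap
          (fun jx => if jx.1 ≤ bl then
            if jx.2 = '0' then ' ' :: empty
            else if jx.2 = '1' then
              (if PySem.Chars.find (PySem.List.slice (List.take (bl + 1).toNat s ++ List.drop (bl + 1).toNat s) (some (jx.1 + 1)) none) ['1'] = -1
               then t else bar ++ empty)
            else []
          else []) = [] := by
        rw [List.flatMap_congr (g := fun _ => []) ?_]
        · simp
        · intro jx hmem
          rw [PySem.List.mem_enumerate_iff] at hmem
          obtain ⟨m2, hm2, rfl⟩ := hmem
          rw [if_neg (show ¬((0 : Int) + ((List.take (bl + 1).toNat s).length : Int) + (m2 : Int) ≤ bl) from by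
            rw [List.length_take]
            push_cast
            omega)]
      rw [hdrop, List.append_nil]
      apply List.flatMap_congr
      intro jx hmem
      rw [PySem.List.mem_enumerate_iff] at hmem
      obtain ⟨m, hm, rfl⟩ := hmem
      simp only [zero_add]
      have hmlen : m < s.length := by
        have := List.length_take_le (bl + 1).toNat s
        omega
      have hmle : (m : Int) ≤ bl := by
        simp only [List.length_take] at hm
        omega
      have hget : (List.take (bl + 1).toNat s)[m] = s[m] := List.getElem_take
      have hidx : (((m : Int)) - 0).toNat + 1 = m + 1 := by omega
      rw [if_pos hmle, hget, hidx]
      by_cases h0 : s[m] = '0'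
      · simp [h0]
      · by_cases h1 : s[m] = '1'
        · have hprop : ('1' ∈ (s.take (bl + 1).toNat).drop (m + 1) ∨
              decide ('1' ∈ s.drop (s.take (bl + 1).toNat).length) = true) ↔
              ('1' ∈ (s.take (bl + 1).toNat).drop (m + 1) ∨
              '1' ∈ s.drop (s.take (bl + 1).toNat).length) := by simp
          rw [if_neg h0, if_neg h0, if_pos h1, if_pos h1, List.take_append_drop]
          have hc := pv_cond s (bl + 1).toNat m hm
          by_cases hAB : ('1' ∈ (s.take (bl + 1).toNat).drop (m + 1) ∨
              '1' ∈ s.drop (s.take (bl + 1).toNat).length)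
          · rw [if_neg (show ¬ PySem.Chars.find (PySem.List.slice s (some ((m : Int) + 1)) none) ['1'] = -1
                from fun hf => (hc.mp hf) hAB),
              if_pos (hprop.mpr hAB)]
          · rw [if_pos (hc.mpr hAB), if_neg (fun h => hAB (hprop.mp h))]
        · rw [if_neg h0, if_neg h0, if_neg h1, if_neg h1]
    · have hs : List.take (bl + 1).toNat s = s := List.take_of_length_le (by omega)
      simp only [hs]
      apply List.flatMap_congr
      intro jx hmem
      rw [PySem.List.mem_enumerate_iff] at hmem
      obtain ⟨m, hm, rfl⟩ := hmem
      simp only [zero_add]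
      have hmle : (m : Int) ≤ bl := by omega
      have hidx : (((m : Int)) - 0).toNat + 1 = m + 1 := by omega
      rw [if_pos hmle, hidx]
      by_cases h0 : s[m] = '0'
      · simp [h0]
      · by_cases h1 : s[m] = '1'
        · have hprop : ('1' ∈ s.drop (m + 1) ∨ decide ('1' ∈ s.drop s.length) = true) ↔
              ('1' ∈ s.drop (m + 1) ∨ '1' ∈ s.drop s.length) := by simp
          rw [if_neg h0, if_neg h0, if_pos h1, if_pos h1]
          have hm' : m < (s.take (bl + 1).toNat).length := by rw [hs]; exact hm
          have hc := pv_cond s (bl + 1).toNat m hm'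
          rw [hs] at hc
          by_cases hAB : ('1' ∈ s.drop (m + 1) ∨ '1' ∈ s.drop s.length)
          · rw [if_neg (show ¬ PySem.Chars.find (PySem.List.slice s (some ((m : Int) + 1)) none) ['1'] = -1
                from fun hf => (hc.mp hf) hAB),
              if_pos (hprop.mpr hAB)]
          · rw [if_pos (hc.mpr hAB), if_neg (fun h => hAB (hprop.mp h))]
        · rw [if_neg h0, if_neg h0, if_neg h1, if_neg h1]
  · simp only [if_neg hbl]
    rw [List.flatMap_congr (g := fun _ => []) ?_]
    · simp [pvRender]
    · intro jx hmem
      rw [PySem.List.mem_enumerate_iff] at hmem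
      obtain ⟨m, hm, rfl⟩ := hmem
      rw [if_neg (by omega)]

lemma pv_step_eq (top bar empty middle end_ : String) (show_ : Int)
    (string_list : List String) (br_length istip : List Int) (structure_ : List String)
    (i0 : Nat) (hi0 : i0 < br_length.length)
    (st : List (List Char) × Option (List Char)) :
    pvStepA top bar empty middle end_ show_ string_list br_length istip structure_ st i0
    = pvStepB top bar (' ' :: empty.toList) (bar.toList ++ empty.toList) middle end_ show_
        string_list istip structure_ st ((i0 : Int), br_length[i0]) := by
  have hbl : PySem.List.pyGetD br_length (i0 : Int) 0 = br_length[i0] := by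
    rw [PySem.List.pyGetD_natCast]
    exact List.getD_eq_getElem br_length 0 hi0
  simp only [pvStepA, pvStepB, hbl, pvRow_eq, Nat.cast_eq_zero]

lemma pv_main_loop (top bar empty middle end_ : String) (show_ : Int)
    (string_list : List String) (br_length istip : List Int) (structure_ : List String) :
    ∀ (m i0 : Nat), i0 + m = br_length.length →
      ∀ (st : List (List Char) × Option (List Char)),
      (List.range' i0 m).foldl (pvStepA top bar empty middle end_ show_ string_list br_length istip structure_) st
      = (PySem.List.enumerate (br_length.drop i0) (i0 : Int)).foldl
          (pvStepB top bar (' ' :: empty.toList) (bar.toList ++ empty.toList) middle end_ show_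
            string_list istip structure_) st := by
  intro m
  induction m with
  | zero =>
    intro i0 h st
    rw [List.drop_of_length_le (by omega)]
    simp [PySem.List.enumerate]
  | succ m ih =>
    intro i0 h st
    have hi0 : i0 < br_length.length := by omega
    rw [List.range'_succ, List.foldl_cons]
    rw [show br_length.drop i0 = br_length[i0] :: br_length.drop (i0 + 1) from
      (List.getElem_cons_drop hi0).symm]
    rw [PySem.List.enumerate_cons, List.foldl_cons]
    rw [show (i0 : Int) + 1 = ((i0 + 1 : Nat) : Int) by push_cast; ring]
    rw [ih (i0 + 1) (by omega)]
    rw [pv_step_eq top bar empty middle end_ show_ string_list br_length istip structure_ i0 hi0 st]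

lemma pv_map_range_pyGetD {β : Type} (xs : List (List Char)) (g : List Char → β) :
    (List.range xs.length).map (fun i : Nat => g (PySem.List.pyGetD xs (i : Int) [])) = xs.map g := by
  apply List.ext_getElem
  · simp
  · intro i h1 h2
    rw [List.getElem_map, List.getElem_map, List.getElem_range]
    rw [PySem.List.pyGetD_natCast, List.getD_eq_getElem xs [] (by simpa using h2)]

-- ===== VERDICT (by name: the statement is the Claim_ definition above) =====
theorem makebranch_spec : Claim_equal_makebranch := by
  intro top bar empty middle end_ show_ string_list br_length istip structure_ hDom hPre
  unfold Spec_makebranch makebranch makebranch_alt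
  dsimp only
  rw [List.range_eq_range']
  have hmain := pv_main_loop top bar empty middle end_ show_ string_list br_length istip
    structure_ br_length.length 0 (by omega) (([], none) : List (List Char) × Option (List Char))
  simp only [List.drop_zero, Nat.cast_zero] at hmain
  rw [hmain]
  rw [PySem.List.foldl_append_singleton_eq_map (f := fun r : List Char => (r.length : Int))]
  rw [PySem.List.foldl_append_singleton_eq_map]
  simp only [List.nil_append]
  set rows := ((PySem.List.enumerate br_length 0).foldl
    (pvStepB top bar (' ' :: empty.toList) (bar.toList ++ empty.toList) middle end_ show_
      string_list istip structure_)
    (([], none) : List (List Char) × Option (List Char))).1 with hrows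
  set w := (PySem.Int.floordiv ((PySem.List.max? (rows.map (fun r => (r.length : Int))) id).getD 0) 10 + 1) * 10 with hw
  rw [pv_map_range_pyGetD rows (fun r => r ++ List.replicate (w - (r.length : Int)).toNat ' ' ++ ['\n'])]
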